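-- pv_equiv track=rewrite | github.com/DanilTsygolnik/exercises | sport_programming/00_simple/ex_2/ex_2_sol.py | odometer
-- ===== SOURCE A (Python) =====
-- def odometer(oksana):
--
--     pairs = 0
--     vc = 0
--     tc = 0
--     tp = 0
--     S = 0
--
--     if len(oksana) % 2 == 0:
--         pairs = len(oksana)
--     else:
--         pairs = len(oksana) - 1
--
--     for p in range(pairs):
--         if p % 2 == 0:
--             vc = oksana[p]
--         else:
--             tc = oksana[p]
--             S += (vc * (tc - tp))
--             tp = tc
--
--     return S
-- ===== SOURCE B (Python) =====
-- def odometer(oksana):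
--     n = len(oksana) // 2
--     vals = oksana[0:2*n:2]
--     times = oksana[1:2*n:2]
--     nxt = vals[1:] + [0]
--     return sum(t * (v - w) for t, v, w in zip(times, vals, nxt))
-- ===== Notes on version B (the rewrite author's own statement) =====
-- stated objective: alternative
-- what changed: Replaces A's single stateful index loop (parity branch, carried previous reading) by staged passes: build the value and reading streams by comprehension, then sum the summation-by-parts (Abel-transformed) series t*(v - v_next) over the zipped streams with the value list shifted forward, instead of v*(t - t_prev) with the reading carried backward.
import Mathlib
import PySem

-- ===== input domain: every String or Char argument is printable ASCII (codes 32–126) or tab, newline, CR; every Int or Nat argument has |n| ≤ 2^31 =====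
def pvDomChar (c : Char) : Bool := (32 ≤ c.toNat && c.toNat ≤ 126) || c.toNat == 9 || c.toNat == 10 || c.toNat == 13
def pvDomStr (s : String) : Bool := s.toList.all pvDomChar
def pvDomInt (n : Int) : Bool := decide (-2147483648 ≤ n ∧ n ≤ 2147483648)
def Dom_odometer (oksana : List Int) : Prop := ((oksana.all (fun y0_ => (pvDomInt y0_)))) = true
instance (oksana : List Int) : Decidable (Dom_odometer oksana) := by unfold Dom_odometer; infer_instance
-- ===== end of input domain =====

-- B replaces A's single stateful index loop by staged passes: comprehension-built value/reading
-- streams and a summation-by-parts sum t*(v - v_next) over the zipped streams (objective: alternative).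


-- ===== PORT A =====
-- loop body of A's 'for p in range(pairs)': state (vc, tc, tp, S)
def odometerStep (oksana : List Int) (st : Int × Int × Int × Int) (p : Int) : Int × Int × Int × Int :=
  match st with
  | (vc, tc, tp, S) =>
    if PySem.Int.mod p 2 == 0 then
      (PySem.List.pyGetD oksana p 0, tc, tp, S)
    else
      let tc' := PySem.List.pyGetD oksana p 0
      (vc, tc', tc', S + vc * (tc' - tp))

def odometer (oksana : List Int) : Int :=
  let pairs : Int := if oksana.length % 2 == 0 then (oksana.length : Int) else (oksana.length : Int) - 1
  ((PySem.List.pyRange 0 pairs 1).foldl (odometerStep oksana) (0, 0, 0, 0)).2.2.2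

-- ===== PORT B =====
-- staged passes: vals = [oksana[2*i] for i in range(n)], times = [oksana[2*i+1] for i in range(n)],
-- nxt = vals[1:] + [0]; result = sum(t*(v - w) for t, v, w in zip(times, vals, nxt))
def odometer_alt (oksana : List Int) : Int :=
  let n : Int := PySem.Int.floordiv (oksana.length : Int) 2
  let vals := (PySem.List.pyRange 0 n 1).map (fun i => PySem.List.pyGetD oksana (2 * i) 0)
  let times := (PySem.List.pyRange 0 n 1).map (fun i => PySem.List.pyGetD oksana (2 * i + 1) 0)
  let nxt := PySem.List.slice vals (some 1) none ++ [0]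
  ((times.zip (vals.zip nxt)).map (fun x => x.1 * (x.2.1 - x.2.2))).sum

-- ===== PRECONDITION & SPEC =====
def Spec_odometer (oksana : List Int) (out : Int) : Prop := out = odometer_alt oksana
instance (oksana : List Int) (out : Int) : Decidable (Spec_odometer oksana out) := by unfold Spec_odometer; infer_instance

-- ===== CLAIM (what is proved, stated in full; the proofs are below) =====
def Claim_equal_odometer : Prop := ∀ (oksana : List Int), Dom_odometer oksana → Spec_odometer oksana (odometer oksana)

-- ===== LEMMAS AND PROOFS =====

-- proof-side view of A's loop: consume the list two at a time
def odometerLoop : List Int → Int → Int → Int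
  | vc :: tc :: rest, tp, total => odometerLoop rest tc (total + vc * (tc - tp))
  | _, _, total => total

-- proof-side pair structure and the Abel-transformed sum
def pairsOf : List Int → List (Int × Int)
  | v :: t :: r => (v, t) :: pairsOf r
  | _ => []

def fvP : List (Int × Int) → Int
  | [] => 0
  | (v, _) :: _ => v

def gP : List (Int × Int) → Int
  | [] => 0
  | (v, t) :: r => t * (v - fvP r) + gP r

-- A's fold over indices [i, i+2k) equals the two-at-a-time loop on the corresponding sublist
lemma odometer_fold_loop (k : Nat) : ∀ (i : Int) (xs : List Int) (v t tp S : Int),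
    0 ≤ i → i % 2 = 0 → i + 2 * k ≤ xs.length →
    ((PySem.List.pyRange i (i + 2 * k) 1).foldl (odometerStep xs) (v, t, tp, S)).2.2.2
      = odometerLoop ((xs.drop i.toNat).take (2 * k)) tp S := by
  induction k with
  | zero =>
    intro i xs v t tp S hi hpar hlen
    rw [PySem.List.pyRange_one_eq_nil (by omega)]
    simp [odometerLoop]
  | succ k ih =>
    intro i xs v t tp S hi hpar hlen
    have hlen' : i.toNat + 2 ≤ xs.length := by omega
    rw [PySem.List.pyRange_one_cons (by omega), PySem.List.pyRange_one_cons (by omega)]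
    simp only [List.foldl_cons]
    have hm0 : PySem.Int.mod i 2 = 0 := by
      rw [PySem.Int.mod_eq_emod_of_pos (by omega)]; exact hpar
    have hm1 : PySem.Int.mod (i + 1) 2 = 1 := by
      rw [PySem.Int.mod_eq_emod_of_pos (by omega)]; omega
    have ha : PySem.List.pyGetD xs i 0 = xs[i.toNat]'(by omega) := by
      rw [PySem.List.pyGetD_eq_getElem xs 0 hi (by omega)]
    have hb : PySem.List.pyGetD xs (i + 1) 0 = xs[i.toNat + 1]'(by omega) := by
      rw [PySem.List.pyGetD_eq_getElem xs 0 (by omega) (by omega)]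
      congr 1
      omega
    push_cast
    rw [show i + 2 * ((k : Int) + 1) = (i + 1 + 1) + 2 * (k : Int) by ring]
    rw [odometerStep, odometerStep, hm0, hm1]
    simp only [beq_iff_eq, one_ne_zero, if_false]
    rw [ih (i + 1 + 1) xs _ _ _ _ (by omega) (by omega) (by omega)]
    have hdrop : xs.drop i.toNat
        = xs[i.toNat]'(by omega) :: xs[i.toNat + 1]'(by omega) :: xs.drop (i.toNat + 2) := by
      rw [List.drop_eq_getElem_cons (by omega), List.drop_eq_getElem_cons (by omega)]
    rw [hdrop]
    have h2 : (i + 1 + 1).toNat = i.toNat + 2 := by omega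
    rw [h2]
    simp only [show 2 * (k + 1) = 2 * k + 1 + 1 by ring, List.take_succ_cons]
    rw [odometerLoop, ha, hb]
    simp

-- the two-at-a-time loop ignores a trailing unpaired element
lemma odometerLoop_take : ∀ (xs : List Int) (tp S : Int),
    odometerLoop (xs.take (2 * (xs.length / 2))) tp S = odometerLoop xs tp S
  | [], _, _ => rfl
  | [_], _, _ => by simp [odometerLoop]
  | v :: t :: r, tp, S => by
    have h : 2 * ((v :: t :: r).length / 2) = 2 * (r.length / 2) + 1 + 1 := by
      simp [List.length_cons]; omega
    rw [h]
    simp only [List.take_succ_cons]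
    rw [odometerLoop, odometerLoop]
    exact odometerLoop_take r t (S + v * (t - tp))

-- Abel summation: the carried-previous loop equals the shifted-next sum
lemma odometerLoop_gP : ∀ (xs : List Int) (tp S : Int),
    odometerLoop xs tp S = S + gP (pairsOf xs) - fvP (pairsOf xs) * tp
  | [], _, _ => by simp [odometerLoop, pairsOf, gP, fvP]
  | [_], _, _ => by simp [odometerLoop, pairsOf, gP, fvP]
  | v :: t :: r, tp, S => by
    rw [odometerLoop, odometerLoop_gP r t (S + v * (t - tp))]
    simp only [pairsOf, gP, fvP]
    ring

-- the comprehension-built streams are the projections of the pair structure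
lemma vals_eq_pairs : ∀ (n : Nat) (xs : List Int), 2 * n ≤ xs.length →
    (List.range n).map (fun k => xs.getD (2 * k) 0) = (pairsOf (xs.take (2 * n))).map Prod.fst
  | 0, _, _ => by simp [pairsOf]
  | n + 1, v :: t :: r, h => by
    rw [List.range_succ_eq_map]
    simp only [List.map_cons, List.map_map]
    rw [show 2 * (n + 1) = 2 * n + 1 + 1 by ring]
    simp only [List.take_succ_cons, pairsOf, List.map_cons]
    refine congrArg₂ _ (by simp) ?_
    rw [← vals_eq_pairs n r (by simp [List.length_cons] at h; omega)]
    apply List.map_congr_left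
    intro k _
    simp [Function.comp, show 2 * (k + 1) = 2 * k + 1 + 1 by ring]
  | n + 1, [], h => by simp at h
  | n + 1, [_], h => by simp at h; omega

lemma times_eq_pairs : ∀ (n : Nat) (xs : List Int), 2 * n ≤ xs.length →
    (List.range n).map (fun k => xs.getD (2 * k + 1) 0) = (pairsOf (xs.take (2 * n))).map Prod.snd
  | 0, _, _ => by simp [pairsOf]
  | n + 1, v :: t :: r, h => by
    rw [List.range_succ_eq_map]
    simp only [List.map_cons, List.map_map]
    rw [show 2 * (n + 1) = 2 * n + 1 + 1 by ring]
    simp only [List.take_succ_cons, pairsOf, List.map_cons]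
    refine congrArg₂ _ (by simp) ?_
    rw [← times_eq_pairs n r (by simp [List.length_cons] at h; omega)]
    apply List.map_congr_left
    intro k _
    simp [Function.comp, show 2 * (k + 1) + 1 = (2 * k + 1) + 1 + 1 by ring]
  | n + 1, [], h => by simp at h
  | n + 1, [_], h => by simp at h; omega

-- the zipped shifted sum computes gP
lemma zip_sum_gP : ∀ (P : List (Int × Int)),
    (((P.map Prod.snd).zip ((P.map Prod.fst).zip ((P.map Prod.fst).tail ++ [0]))).map
        (fun x => x.1 * (x.2.1 - x.2.2))).sum = gP P
  | [] => rfl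
  | [(v, t)] => by simp [gP, fvP]
  | (v, t) :: (v2, t2) :: r => by
    have ih := zip_sum_gP ((v2, t2) :: r)
    simp only [List.map_cons, List.tail_cons, List.cons_append, List.zip_cons_cons,
      List.sum_cons] at ih ⊢
    rw [ih]
    simp [gP, fvP]

-- pairsOf ignores a trailing unpaired element
lemma pairsOf_take : ∀ (xs : List Int), pairsOf (xs.take (2 * (xs.length / 2))) = pairsOf xs
  | [] => rfl
  | [_] => by simp [pairsOf]
  | v :: t :: r => by
    have h : 2 * ((v :: t :: r).length / 2) = 2 * (r.length / 2) + 1 + 1 := by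
      simp [List.length_cons]; omega
    rw [h]
    simp only [List.take_succ_cons, pairsOf]
    rw [pairsOf_take r]

-- ===== VERDICT (by name: the statement is the Claim_ definition above) =====
theorem odometer_spec : Claim_equal_odometer := by
  intro xs _
  unfold Spec_odometer odometer odometer_alt
  have hn : PySem.Int.floordiv (xs.length : Int) 2 = ((xs.length / 2 : Nat) : Int) := by
    exact_mod_cast PySem.Int.floordiv_natCast xs.length 2
  have hpairs : (if xs.length % 2 == 0 then (xs.length : Int) else (xs.length : Int) - 1)
      = 0 + 2 * (xs.length / 2 : Nat) := by
    have := Nat.div_add_mod xs.length 2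
    by_cases h : xs.length % 2 = 0 <;> simp [h] <;> omega
  rw [hpairs, odometer_fold_loop (xs.length / 2) 0 xs 0 0 0 0 (le_refl 0) (by decide) (by omega)]
  simp only [Int.toNat_zero, List.drop_zero]
  rw [odometerLoop_take, odometerLoop_gP]
  -- now rewrite B's side
  rw [hn, PySem.List.slice_from_one]
  have hvals : (PySem.List.pyRange 0 ((xs.length / 2 : Nat) : Int) 1).map
      (fun i => PySem.List.pyGetD xs (2 * i) 0)
      = (pairsOf (xs.take (2 * (xs.length / 2)))).map Prod.fst := by
    rw [PySem.List.pyRange_one]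
    simp only [zero_add, sub_zero, Int.toNat_natCast, List.map_map]
    rw [← vals_eq_pairs (xs.length / 2) xs (by omega)]
    apply List.map_congr_left
    intro k _
    simp [Function.comp]
    rw [show ((2 : Int) * (k : Int)) = ((2 * k : Nat) : Int) by push_cast; ring,
        PySem.List.pyGetD_natCast]
    simp [List.getD]
  have htimes : (PySem.List.pyRange 0 ((xs.length / 2 : Nat) : Int) 1).map
      (fun i => PySem.List.pyGetD xs (2 * i + 1) 0)
      = (pairsOf (xs.take (2 * (xs.length / 2)))).map Prod.snd := by
    rw [PySem.List.pyRange_one]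
    simp only [zero_add, sub_zero, Int.toNat_natCast, List.map_map]
    rw [← times_eq_pairs (xs.length / 2) xs (by omega)]
    apply List.map_congr_left
    intro k _
    simp [Function.comp]
    rw [show ((2 : Int) * (k : Int) + 1) = ((2 * k + 1 : Nat) : Int) by push_cast; ring,
        PySem.List.pyGetD_natCast]
    simp [List.getD]
  rw [hvals, htimes, zip_sum_gP]
  rw [pairsOf_take]
  ring
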